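-- pv_equiv track=rewrite | github.com/HICE-CodingTestStudy/solved | additionalProblem/week35/week35_hsw/택배.py | solution
-- ===== SOURCE A (Python) =====
-- def solution(cap, n, deliveries, pickups):
--     answer,delivery, pickup  = 0, 0, 0
--     deliveries.reverse()
--     pickups.reverse()
--
--     for i in range(n):
--         delivery += deliveries[i]
--         pickup += pickups[i]
--
--         while delivery > 0 or pickup > 0:
--             delivery -= cap
--             pickup -= cap
--             answer += (n - i) * 2
--
--     return answer
-- ===== SOURCE B (Python) =====
-- def solution(cap, n, deliveries, pickups):
--     # Same in-place reversal side effect as the original.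
--     deliveries.reverse()
--     pickups.reverse()
--     answer = 0
--     sd = sp = cnt = 0
--     for i in range(n):
--         sd += deliveries[i]
--         sp += pickups[i]
--         # trips needed so far = max of ceiling divisions (no simulation loop)
--         cnt_new = max(cnt, -(-sd // cap), -(-sp // cap))
--         answer += 2 * (n - i) * (cnt_new - cnt)
--         cnt = cnt_new
--     return answer
-- ===== Notes on version B (the rewrite author's own statement) =====
-- stated objective: alternative
-- what changed: A simulates every truck trip with a nested while loop subtracting cap one trip at a time; B replaces the whole inner loop by a closed-form ceiling-division trip count per position (cnt = max(cnt, ceil(sd/cap), ceil(sp/cap))) in a single pass.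
-- outside the precondition, e.g. on solution(0, 1, [0], [0]): A returns 0, B raises ZeroDivisionError; on solution(-2, 1, [-3], [0]): A returns 0, B returns 4
import Mathlib
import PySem

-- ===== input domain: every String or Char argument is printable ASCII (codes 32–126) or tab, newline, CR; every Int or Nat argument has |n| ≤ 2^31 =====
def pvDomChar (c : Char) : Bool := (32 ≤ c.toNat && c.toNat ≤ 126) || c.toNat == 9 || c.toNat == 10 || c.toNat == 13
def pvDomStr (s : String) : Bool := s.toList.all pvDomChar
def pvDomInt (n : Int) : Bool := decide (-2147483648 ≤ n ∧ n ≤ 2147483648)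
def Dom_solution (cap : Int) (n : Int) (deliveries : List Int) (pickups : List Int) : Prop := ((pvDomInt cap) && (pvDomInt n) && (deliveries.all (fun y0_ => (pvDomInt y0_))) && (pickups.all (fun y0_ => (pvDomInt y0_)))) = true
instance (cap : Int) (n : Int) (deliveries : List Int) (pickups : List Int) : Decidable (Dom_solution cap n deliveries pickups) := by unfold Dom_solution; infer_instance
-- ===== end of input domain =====

-- B replaces A's trip-by-trip inner while loop with a closed-form ceiling-division trip count.
-- Both A and B reverse the two input lists in place (same side effect); the claim is about the return value.

-- ===== PORT A =====
-- the inner 'while delivery > 0 or pickup > 0' loop; fuel only makes it total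
-- (under Pre_ cap ≥ 1, fuel = |delivery| + |pickup| + 1 exceeds the iterations Python runs)
def solutionWhile (fuel : Nat) (cap m delivery pickup answer : Int) : Int × Int × Int :=
  match fuel with
  | 0 => (delivery, pickup, answer)
  | Nat.succ f =>
    if delivery > 0 ∨ pickup > 0 then
      solutionWhile f cap m (delivery - cap) (pickup - cap) (answer + m * 2)
    else (delivery, pickup, answer)

-- one iteration of A's 'for i in range(n)' body; state = (answer, delivery, pickup)
def solutionBody (cap n : Int) (rd rp : List Int) (st : Int × Int × Int) (i : Int) : Int × Int × Int :=
  let delivery := st.2.1 + PySem.List.pyGetD rd i 0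
  let pickup := st.2.2 + PySem.List.pyGetD rp i 0
  let r := solutionWhile (delivery.natAbs + pickup.natAbs + 1) cap (n - i) delivery pickup st.1
  (r.2.2, r.1, r.2.1)

def solution (cap : Int) (n : Int) (deliveries : List Int) (pickups : List Int) : Int :=
  ((PySem.List.pyRange 0 n 1).foldl (solutionBody cap n deliveries.reverse pickups.reverse) (0, 0, 0)).1

-- ===== PORT B =====
-- one iteration of B's loop; state = (answer, sd, sp, cnt); '-(-sd // cap)' is the ceiling division
def solutionAltBody (cap n : Int) (rd rp : List Int) (st : Int × Int × Int × Int) (i : Int) :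
    Int × Int × Int × Int :=
  let sd := st.2.1 + PySem.List.pyGetD rd i 0
  let sp := st.2.2.1 + PySem.List.pyGetD rp i 0
  let cnt := st.2.2.2
  let cntNew := max (max cnt (-(PySem.Int.floordiv (-sd) cap))) (-(PySem.Int.floordiv (-sp) cap))
  (st.1 + 2 * (n - i) * (cntNew - cnt), sd, sp, cntNew)

def solution_alt (cap : Int) (n : Int) (deliveries : List Int) (pickups : List Int) : Int :=
  ((PySem.List.pyRange 0 n 1).foldl (solutionAltBody cap n deliveries.reverse pickups.reverse) (0, 0, 0, 0)).1

-- ===== PRECONDITION & SPEC =====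
-- Pre_ excludes cap ≤ 0 when the loop actually runs (n > 0): there the Python A loops forever
-- as soon as some cumulative load is positive, and in the remaining degenerate cases A returns 0
-- while B's ceiling division raises ZeroDivisionError at cap = 0 or counts phantom trips at
-- cap < 0; it also excludes n larger than a list length, where A raises IndexError.
def Pre_solution (cap : Int) (n : Int) (deliveries : List Int) (pickups : List Int) : Prop :=
  (1 ≤ cap ∨ n ≤ 0) ∧ n ≤ (deliveries.length : Int) ∧ n ≤ (pickups.length : Int)
instance (cap : Int) (n : Int) (deliveries : List Int) (pickups : List Int) : Decidable (Pre_solution cap n deliveries pickups) := by unfold Pre_solution; infer_instance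

def pvWitness_solution : Int × Int × List Int × List Int := (4, 2, [1, 0], [0, 3])

def Spec_solution (cap : Int) (n : Int) (deliveries : List Int) (pickups : List Int) (out : Int) : Prop := out = solution_alt cap n deliveries pickups
instance (cap : Int) (n : Int) (deliveries : List Int) (pickups : List Int) (out : Int) : Decidable (Spec_solution cap n deliveries pickups out) := by unfold Spec_solution; infer_instance

-- ===== CLAIM (what is proved, stated in full; the proofs are below) =====
def Claim_equal_solution : Prop := ∀ (cap : Int) (n : Int) (deliveries : List Int) (pickups : List Int), Dom_solution cap n deliveries pickups → Pre_solution cap n deliveries pickups → Spec_solution cap n deliveries pickups (solution cap n deliveries pickups)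

-- ===== LEMMAS AND PROOFS =====

-- ceiling division -(-x // cap), B's trip count for one accumulated load
def pvCeil (cap x : Int) : Int := -(PySem.Int.floordiv (-x) cap)

-- combined number of inner-loop iterations A runs from loads (d, p)
def pvT (cap d p : Int) : Int := max (max (pvCeil cap d) (pvCeil cap p)) 0

lemma pvCeil_bracket (cap x : Int) (hcap : 0 < cap) :
    (pvCeil cap x - 1) * cap < x ∧ x ≤ pvCeil cap x * cap :=
  (PySem.Int.neg_floordiv_neg_eq_iff_of_pos hcap).mp rfl

lemma pvCeil_nonpos (cap x : Int) (hcap : 0 < cap) (hx : x ≤ 0) : pvCeil cap x ≤ 0 := by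
  rcases pvCeil_bracket cap x hcap with ⟨h1, _⟩
  nlinarith

lemma pvCeil_pos (cap x : Int) (hcap : 0 < cap) (hx : 0 < x) : 1 ≤ pvCeil cap x := by
  rcases pvCeil_bracket cap x hcap with ⟨_, h2⟩
  nlinarith

-- linearity: removing k whole capacities lowers the trip count by k
lemma pvCeil_sub_mul (cap x k : Int) (hcap : 0 < cap) :
    pvCeil cap (x - cap * k) = pvCeil cap x - k := by
  rcases pvCeil_bracket cap x hcap with ⟨h1, h2⟩
  refine (PySem.Int.neg_floordiv_neg_eq_iff_of_pos hcap).mpr ⟨?_, ?_⟩ <;> nlinarith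

lemma solutionWhile_eq (cap : Int) (hcap : 1 ≤ cap) :
    ∀ (fuel : Nat) (d p m a : Int), max d p ≤ (fuel : Int) →
      solutionWhile fuel cap m d p a =
        (d - cap * pvT cap d p, p - cap * pvT cap d p, a + m * 2 * pvT cap d p) := by
  intro fuel
  induction fuel with
  | zero =>
    intro d p m a hf
    have hd := pvCeil_nonpos cap d (by omega) (by simp at hf; omega)
    have hp := pvCeil_nonpos cap p (by omega) (by simp at hf; omega)
    have hT : pvT cap d p = 0 := by unfold pvT; omega
    simp [solutionWhile, hT]
  | succ f ih =>
    intro d p m a hf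
    by_cases h : d > 0 ∨ p > 0
    · have hTpos : 1 ≤ max (pvCeil cap d) (pvCeil cap p) := by
        rcases h with h | h
        · have := pvCeil_pos cap d (by omega) h; omega
        · have := pvCeil_pos cap p (by omega) h; omega
      have hT : pvT cap d p = max (pvCeil cap d) (pvCeil cap p) := by unfold pvT; omega
      have hd1 : pvCeil cap (d - cap) = pvCeil cap d - 1 := by
        have := pvCeil_sub_mul cap d 1 (by omega); simpa using this
      have hp1 : pvCeil cap (p - cap) = pvCeil cap p - 1 := by
        have := pvCeil_sub_mul cap p 1 (by omega); simpa using this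
      have hT' : pvT cap (d - cap) (p - cap) = pvT cap d p - 1 := by
        unfold pvT; rw [hd1, hp1]; omega
      rw [solutionWhile, if_pos h, ih (d - cap) (p - cap) m (a + m * 2) (by simp at hf ⊢; omega),
        hT']
      simp only [Prod.mk.injEq]
      refine ⟨by ring, by ring, by ring⟩
    · rw [not_or, not_lt, not_lt] at h
      have hd := pvCeil_nonpos cap d (by omega) h.1
      have hp := pvCeil_nonpos cap p (by omega) h.2
      have hT : pvT cap d p = 0 := by unfold pvT; omega
      rw [solutionWhile, if_neg (by omega), hT]
      simp only [Prod.mk.injEq]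
      refine ⟨by ring, by ring, by ring⟩

-- A's state is the image of B's state: delivery = sd - cap*cnt, pickup = sp - cap*cnt
lemma fold_rel (cap n : Int) (hcap : 1 ≤ cap) (rd rp : List Int) :
    ∀ (L : List Int) (a sd sp cnt : Int), 0 ≤ cnt →
      L.foldl (solutionBody cap n rd rp) (a, sd - cap * cnt, sp - cap * cnt) =
        (fun s : Int × Int × Int × Int => (s.1, s.2.1 - cap * s.2.2.2, s.2.2.1 - cap * s.2.2.2))
          (L.foldl (solutionAltBody cap n rd rp) (a, sd, sp, cnt)) := by
  intro L
  induction L with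
  | nil => intro a sd sp cnt _; rfl
  | cons i L ih =>
    intro a sd sp cnt hcnt
    set x := PySem.List.pyGetD rd i 0 with hx
    set y := PySem.List.pyGetD rp i 0 with hy
    -- evaluate one step of A
    have hA : solutionBody cap n rd rp (a, sd - cap * cnt, sp - cap * cnt) i =
        (a + 2 * (n - i) * (max (max cnt (pvCeil cap (sd + x))) (pvCeil cap (sp + y)) - cnt),
         (sd + x) - cap * max (max cnt (pvCeil cap (sd + x))) (pvCeil cap (sp + y)),
         (sp + y) - cap * max (max cnt (pvCeil cap (sd + x))) (pvCeil cap (sp + y))) := by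
      unfold solutionBody
      simp only [← hx, ← hy]
      have hd : sd - cap * cnt + x = (sd + x) - cap * cnt := by ring
      have hp : sp - cap * cnt + y = (sp + y) - cap * cnt := by ring
      rw [hd, hp,
        solutionWhile_eq cap hcap _ _ _ _ _ (by omega)]
      have hdc : pvCeil cap ((sd + x) - cap * cnt) = pvCeil cap (sd + x) - cnt :=
        pvCeil_sub_mul cap (sd + x) cnt (by omega)
      have hpc : pvCeil cap ((sp + y) - cap * cnt) = pvCeil cap (sp + y) - cnt :=
        pvCeil_sub_mul cap (sp + y) cnt (by omega)
      have hTv : pvT cap ((sd + x) - cap * cnt) ((sp + y) - cap * cnt) =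
          max (max cnt (pvCeil cap (sd + x))) (pvCeil cap (sp + y)) - cnt := by
        unfold pvT; rw [hdc, hpc]; omega
      rw [hTv]
      simp only [Prod.mk.injEq]
      refine ⟨by ring, by ring, by ring⟩
    -- evaluate one step of B
    have hB : solutionAltBody cap n rd rp (a, sd, sp, cnt) i =
        (a + 2 * (n - i) * (max (max cnt (pvCeil cap (sd + x))) (pvCeil cap (sp + y)) - cnt),
         sd + x, sp + y, max (max cnt (pvCeil cap (sd + x))) (pvCeil cap (sp + y))) := by
      unfold solutionAltBody pvCeil
      simp only [← hx, ← hy]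
    rw [List.foldl_cons, List.foldl_cons, hA, hB]
    exact ih _ _ _ _ (by unfold pvCeil at *; omega)

-- ===== VERDICT (by name: the statement is the Claim_ definition above) =====
theorem solution_spec : Claim_equal_solution := by
  intro cap n deliveries pickups _ hpre
  unfold Spec_solution solution solution_alt
  rcases hpre.1 with hcap | hn
  · have h := fold_rel cap n hcap deliveries.reverse pickups.reverse
      (PySem.List.pyRange 0 n 1) 0 0 0 0 le_rfl
    simp only [mul_zero, sub_zero] at h
    rw [h]
  · rw [PySem.List.pyRange_one_eq_nil hn]; rfl
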